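-- pv_equiv track=rewrite | github.com/gabrielgomesml/ProjetoP1-2019.1 | agenda.py | ordenarPorPrioridade
-- ===== SOURCE A (Python) =====
-- def ordenarPorPrioridade(itens):
--     for x in itens:
--         aux = 0
--         while aux < len(itens) - 1:
--             if itens[aux][1][2].upper() > itens[aux + 1][1][2].upper():
--                 temp = itens[aux]
--                 itens[aux] = itens[aux + 1]
--                 itens[aux + 1] = temp
--             aux += 1
--     prioridadesVazias = []
--     contadorVazio = 0
--     for x in itens:
--         if x[1][2] == '':
--             prioridadesVazias.append(x)
--             contadorVazio += 1
--     while contadorVazio != 0: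
--         itens.pop(0)
--         contadorVazio = contadorVazio - 1
--     itens += prioridadesVazias
--     return itens
-- ===== SOURCE B (Python) =====
-- def ordenarPorPrioridade(itens):
--     vazias = [x for x in itens if x[1][2] == '']
--     naoVazias = [x for x in itens if x[1][2] != '']
--     itens[:] = sorted(naoVazias, key=lambda x: x[1][2].upper()) + vazias
--     return itens
-- ===== Notes on version B (the rewrite author's own statement) =====
-- stated objective: faster
-- what changed: Replaces A's hand-written n-pass adjacent-swap bubble sort plus pop-front empty relocation with a partition into empty/non-empty priority, one stable library sorted() of the non-empty part, and a single in-place splice.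
import Mathlib
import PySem

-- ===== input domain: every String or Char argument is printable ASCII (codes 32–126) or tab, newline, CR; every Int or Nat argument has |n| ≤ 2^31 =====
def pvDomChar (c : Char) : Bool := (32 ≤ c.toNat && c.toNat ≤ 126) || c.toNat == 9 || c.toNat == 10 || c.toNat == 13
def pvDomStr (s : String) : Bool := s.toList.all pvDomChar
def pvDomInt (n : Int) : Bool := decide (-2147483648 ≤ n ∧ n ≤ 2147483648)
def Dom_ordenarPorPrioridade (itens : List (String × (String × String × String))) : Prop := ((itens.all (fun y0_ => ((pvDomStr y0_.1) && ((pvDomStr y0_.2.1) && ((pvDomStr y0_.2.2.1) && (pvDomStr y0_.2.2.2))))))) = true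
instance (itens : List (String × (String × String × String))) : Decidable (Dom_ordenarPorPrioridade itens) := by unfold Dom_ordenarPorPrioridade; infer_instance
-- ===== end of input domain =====

-- B replaces A's n-pass adjacent-swap bubble sort + pop-front empty relocation by
-- partition / one stable library sort of the non-empty part / concatenation (objective: faster).
-- Both Pythons mutate `itens` in place and return the same object; B performs the same
-- final mutation via `itens[:] = ...`, so the side effect matches too.

-- ===== PORT A =====
-- the sort key A compares: item[1][2].upper()
def pvKey (x : String × (String × String × String)) : String := PySem.Str.upper x.2.2.2

-- inner `while aux < len(itens)-1` loop: one left-to-right adjacent compare-and-swap pass,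
-- carrying the element currently at position aux
def pvGo (cur : String × (String × String × String)) :
    List (String × (String × String × String)) → List (String × (String × String × String))
  | [] => [cur]
  | b :: r => if pvKey cur > pvKey b then b :: pvGo cur r else cur :: pvGo b r

def pvPass (l : List (String × (String × String × String))) :
    List (String × (String × String × String)) :=
  match l with
  | [] => []
  | a :: rest => pvGo a rest

-- `while contadorVazio != 0: itens.pop(0)`
def pvPopFront : Nat → List (String × (String × String × String)) → List (String × (String × String × String))
  | 0, l => l
  | n + 1, l => pvPopFront n l.tail

def ordenarPorPrioridade (itens : List (String × (String × String × String))) :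
    List (String × (String × String × String)) :=
  -- `for x in itens:` runs the inner pass once per (length-invariant) element
  let sortedL := (List.range itens.length).foldl (fun acc _ => pvPass acc) itens
  -- collect the empty-priority items and count them
  let vaz := sortedL.foldl (fun acc x => if x.2.2.2 == "" then acc ++ [x] else acc) []
  -- pop the first contadorVazio items, then append prioridadesVazias
  pvPopFront vaz.length sortedL ++ vaz

-- ===== PORT B =====
def ordenarPorPrioridade_alt (itens : List (String × (String × String × String))) :
    List (String × (String × String × String)) :=
  let vazias := itens.filter (fun x => x.2.2.2 == "")
  let naoVazias := itens.filter (fun x => x.2.2.2 != "")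
  PySem.List.sorted naoVazias (fun x => PySem.Str.upper x.2.2.2) ++ vazias

-- ===== PRECONDITION & SPEC =====
def Spec_ordenarPorPrioridade (itens : List (String × (String × String × String))) (out : List (String × (String × String × String))) : Prop := out = ordenarPorPrioridade_alt itens
instance (itens : List (String × (String × String × String))) (out : List (String × (String × String × String))) : Decidable (Spec_ordenarPorPrioridade itens out) := by unfold Spec_ordenarPorPrioridade; infer_instance

-- ===== CLAIM (what is proved, stated in full; the proofs are below) =====
def Claim_equal_ordenarPorPrioridade : Prop := ∀ (itens : List (String × (String × String × String))), Dom_ordenarPorPrioridade itens → Spec_ordenarPorPrioridade itens (ordenarPorPrioridade itens)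

-- ===== LEMMAS AND PROOFS =====

-- index-decorated versions of the key and the pass (proof device: ties are broken
-- by the original position, making the key injective on decorated lists)
def pvKeyD (p : (String × (String × String × String)) × Nat) : Lex (String × Nat) :=
  toLex (pvKey p.1, p.2)

def pvGoD (cur : (String × (String × String × String)) × Nat) :
    List ((String × (String × String × String)) × Nat) → List ((String × (String × String × String)) × Nat)
  | [] => [cur]
  | b :: r => if pvKeyD cur > pvKeyD b then b :: pvGoD cur r else cur :: pvGoD b r

def pvPassD (l : List ((String × (String × String × String)) × Nat)) :
    List ((String × (String × String × String)) × Nat) :=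
  match l with
  | [] => []
  | a :: rest => pvGoD a rest

-- stability invariant: equal-key elements appear in increasing original position
def pvStb (d : List ((String × (String × String × String)) × Nat)) : Prop :=
  d.Pairwise (fun p q => pvKey p.1 = pvKey q.1 → p.2 < q.2)

theorem pvGoD_perm (cur : (String × (String × String × String)) × Nat)
    (l : List ((String × (String × String × String)) × Nat)) :
    (pvGoD cur l).Perm (cur :: l) := by
  induction l generalizing cur with
  | nil => simp [pvGoD]
  | cons b r ih =>
    simp only [pvGoD]
    split
    · exact ((ih cur).cons b).trans (List.Perm.swap cur b r)
    · exact (ih b).cons cur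

theorem pvPassD_perm (l : List ((String × (String × String × String)) × Nat)) :
    (pvPassD l).Perm l := by
  cases l with
  | nil => simp [pvPassD]
  | cons a rest => simpa [pvPassD] using pvGoD_perm a rest

theorem pvPassD_iterate_perm (n : Nat) (l : List ((String × (String × String × String)) × Nat)) :
    (pvPassD^[n] l).Perm l := by
  induction n generalizing l with
  | zero => simp
  | succ n ih =>
    rw [Function.iterate_succ_apply]
    exact (ih (pvPassD l)).trans (pvPassD_perm l)

theorem pvGoD_map_fst (cur : (String × (String × String × String)) × Nat)
    (l : List ((String × (String × String × String)) × Nat))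
    (h : pvStb (cur :: l)) :
    (pvGoD cur l).map Prod.fst = pvGo cur.1 (l.map Prod.fst) := by
  induction l generalizing cur with
  | nil => simp [pvGoD, pvGo]
  | cons b r ih =>
    have hhead : pvKey cur.1 = pvKey b.1 → cur.2 < b.2 := (List.pairwise_cons.mp h).1 b (by simp)
    have hcond : (pvKeyD cur > pvKeyD b) = (pvKey cur.1 > pvKey b.1) := by
      simp only [pvKeyD, gt_iff_lt]
      apply propext
      rw [Prod.Lex.toLex_lt_toLex]
      constructor
      · rintro (hk | ⟨hk, hi⟩)
        · exact hk
        · exact absurd (hhead hk.symm) (by omega)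
      · exact fun hk => Or.inl hk
    by_cases hk : pvKey cur.1 > pvKey b.1
    · have h' : pvStb (cur :: r) :=
        h.sublist (List.Sublist.cons₂ cur (List.sublist_cons_self b r))
      simp [pvGoD, pvGo, hcond, hk, ih cur h']
    · have h' : pvStb (b :: r) := (List.pairwise_cons.mp h).2
      simp [pvGoD, pvGo, hcond, hk, ih b h']

theorem pvGoD_stb (cur : (String × (String × String × String)) × Nat)
    (l : List ((String × (String × String × String)) × Nat))
    (h : pvStb (cur :: l)) : pvStb (pvGoD cur l) := by
  induction l generalizing cur with
  | nil =>
    simp [pvGoD, pvStb]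
  | cons b r ih =>
    have hcons := List.pairwise_cons.mp h
    have hhead : pvKey cur.1 = pvKey b.1 → cur.2 < b.2 := hcons.1 b (by simp)
    have hbr : pvStb (b :: r) := hcons.2
    have hcr : pvStb (cur :: r) :=
      h.sublist (List.Sublist.cons₂ cur (List.sublist_cons_self b r))
    simp only [pvGoD]
    split
    · rename_i hlt
      have hkne : pvKey b.1 ≠ pvKey cur.1 := by
        rcases (Prod.Lex.toLex_lt_toLex).mp hlt with hk | ⟨hk, hi⟩
        · exact ne_of_lt hk
        · exact absurd (hhead hk.symm) (by omega)
      refine List.pairwise_cons.mpr ⟨?_, ih cur hcr⟩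
      intro y hy
      have hy' : y ∈ cur :: r := (pvGoD_perm cur r).mem_iff.mp hy
      rcases List.mem_cons.mp hy' with rfl | hy''
      · exact fun hk => absurd hk hkne
      · exact (List.pairwise_cons.mp hbr).1 y hy''
    · refine List.pairwise_cons.mpr ⟨?_, ih b hbr⟩
      intro y hy
      have hy' : y ∈ b :: r := (pvGoD_perm b r).mem_iff.mp hy
      rcases List.mem_cons.mp hy' with rfl | hy''
      · exact hhead
      · exact hcons.1 y (by simp [hy''])

theorem pvPassD_map_fst (l : List ((String × (String × String × String)) × Nat))
    (h : pvStb l) : (pvPassD l).map Prod.fst = pvPass (l.map Prod.fst) := by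
  cases l with
  | nil => simp [pvPassD, pvPass]
  | cons a rest => simpa [pvPassD, pvPass] using pvGoD_map_fst a rest h

theorem pvPassD_stb (l : List ((String × (String × String × String)) × Nat))
    (h : pvStb l) : pvStb (pvPassD l) := by
  cases l with
  | nil => simpa [pvPassD] using h
  | cons a rest => simpa [pvPassD] using pvGoD_stb a rest h

theorem pvPassD_iterate_map_fst (n : Nat) (l : List ((String × (String × String × String)) × Nat))
    (h : pvStb l) :
    (pvPassD^[n] l).map Prod.fst = pvPass^[n] (l.map Prod.fst) := by
  induction n generalizing l with
  | zero => simp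
  | succ n ih =>
    rw [Function.iterate_succ_apply, Function.iterate_succ_apply]
    rw [← pvPassD_map_fst l h]
    exact ih (pvPassD l) (pvPassD_stb l h)

-- one pass moves a maximum to the end
theorem pvGoD_maxLast (l : List ((String × (String × String × String)) × Nat))
    (cur : (String × (String × String × String)) × Nat) :
    ∃ t m, pvGoD cur l = t ++ [m] ∧ (∀ x ∈ cur :: l, pvKeyD x ≤ pvKeyD m) ∧ t.length = l.length := by
  induction l generalizing cur with
  | nil =>
    exact ⟨[], cur, by simp [pvGoD], by simp, rfl⟩
  | cons b r ih =>
    by_cases hk : pvKeyD cur > pvKeyD b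
    · obtain ⟨t, m, heq, hle, hlen⟩ := ih cur
      refine ⟨b :: t, m, by simp [pvGoD, hk, heq], ?_, by simp [hlen]⟩
      intro x hx
      rcases List.mem_cons.mp hx with hxc | hx'
      · rw [hxc]; exact hle cur (by simp)
      · rcases List.mem_cons.mp hx' with hxb | hx''
        · rw [hxb]; exact le_of_lt (lt_of_lt_of_le hk (hle cur (by simp)))
        · exact hle x (by simp [hx''])
    · obtain ⟨t, m, heq, hle, hlen⟩ := ih b
      refine ⟨cur :: t, m, by simp [pvGoD, hk, heq], ?_, by simp [hlen]⟩
      intro x hx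
      rcases List.mem_cons.mp hx with hxc | hx'
      · rw [hxc]; exact le_trans (not_lt.mp hk) (hle b (by simp))
      · exact hle x hx'

theorem pvGoD_append_max (l : List ((String × (String × String × String)) × Nat))
    (cur m : (String × (String × String × String)) × Nat)
    (h : ∀ x ∈ cur :: l, pvKeyD x ≤ pvKeyD m) :
    pvGoD cur (l ++ [m]) = pvGoD cur l ++ [m] := by
  induction l generalizing cur with
  | nil =>
    have hcm : ¬ pvKeyD cur > pvKeyD m := not_lt.mpr (h cur (by simp))
    simp [pvGoD, hcm]
  | cons b r ih =>
    have hc : ∀ x ∈ cur :: r, pvKeyD x ≤ pvKeyD m := by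
      intro x hx
      rcases List.mem_cons.mp hx with hxc | hx'
      · rw [hxc]; exact h cur (by simp)
      · exact h x (by simp [hx'])
    have hb : ∀ x ∈ b :: r, pvKeyD x ≤ pvKeyD m := by
      intro x hx
      rcases List.mem_cons.mp hx with hxc | hx'
      · rw [hxc]; exact h b (by simp)
      · exact h x (by simp [hx'])
    by_cases hk : pvKeyD cur > pvKeyD b
    · simp [pvGoD, hk, ih cur hc]
    · simp [pvGoD, hk, ih b hb]

theorem pvPassD_append_max (t : List ((String × (String × String × String)) × Nat))
    (m : (String × (String × String × String)) × Nat)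
    (h : ∀ x ∈ t, pvKeyD x ≤ pvKeyD m) :
    pvPassD (t ++ [m]) = pvPassD t ++ [m] := by
  cases t with
  | nil =>
    simp [pvPassD, pvGoD]
  | cons a rest =>
    have := pvGoD_append_max rest a m (by intro x hx; exact h x (by simpa using hx))
    simpa [pvPassD] using this

theorem pvPassD_iterate_append_max (n : Nat) (t : List ((String × (String × String × String)) × Nat))
    (m : (String × (String × String × String)) × Nat)
    (h : ∀ x ∈ t, pvKeyD x ≤ pvKeyD m) :
    pvPassD^[n] (t ++ [m]) = pvPassD^[n] t ++ [m] := by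
  induction n generalizing t with
  | zero => simp
  | succ n ih =>
    rw [Function.iterate_succ_apply, Function.iterate_succ_apply]
    rw [pvPassD_append_max t m h]
    exact ih (pvPassD t) (fun x hx => h x ((pvPassD_perm t).mem_iff.mp hx))

theorem pvPassD_iterate_sorted (n : Nat) (l : List ((String × (String × String × String)) × Nat))
    (h : l.length ≤ n) :
    (pvPassD^[n] l).Pairwise (fun p q => pvKeyD p ≤ pvKeyD q) := by
  induction n generalizing l with
  | zero =>
    have : l = [] := List.eq_nil_of_length_eq_zero (Nat.le_zero.mp h)
    simp [this]
  | succ n ih =>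
    rw [Function.iterate_succ_apply]
    cases l with
    | nil =>
      have hnil : pvPassD [] = [] := rfl
      rw [hnil]; exact ih [] (by simp)
    | cons a rest =>
      obtain ⟨t, m, heq, hle, hlen⟩ := pvGoD_maxLast rest a
      have hpass : pvPassD (a :: rest) = t ++ [m] := by simpa [pvPassD] using heq
      have hperm : (t ++ [m]).Perm (a :: rest) := hpass ▸ pvPassD_perm (a :: rest)
      have hmemle : ∀ x ∈ t, pvKeyD x ≤ pvKeyD m := by
        intro x hx
        exact hle x (hperm.mem_iff.mp (by simp [hx]))
      rw [hpass, pvPassD_iterate_append_max n t m hmemle]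
      have hlt : t.length ≤ n := by
        simp at h; omega
      refine (List.pairwise_append).mpr ⟨ih t hlt, by simp, ?_⟩
      intro x hx y hy
      have hxt : x ∈ t := (pvPassD_iterate_perm n t).mem_iff.mp hx
      have hym : y = m := by simpa using hy
      subst hym
      exact hle x (hperm.mem_iff.mp (by simp [hxt]))

-- strictness from distinct positions
theorem pvStrict_of_le_of_snd_ne (d : List ((String × (String × String × String)) × Nat))
    (h1 : d.Pairwise (fun p q => pvKeyD p ≤ pvKeyD q))
    (h2 : d.Pairwise (fun p q => p.2 ≠ q.2)) :
    d.Pairwise (fun p q => pvKeyD p < pvKeyD q) := by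
  refine (h1.and h2).imp ?_
  rintro p q ⟨hle, hne⟩
  refine lt_of_le_of_ne hle ?_
  intro he
  apply hne
  have hpq : (pvKey p.1, p.2) = (pvKey q.1, q.2) := toLex.injective (by simpa [pvKeyD] using he)
  exact (Prod.ext_iff.mp hpq).2

theorem pvZipIdx_le_snd (l : List (String × (String × String × String)))
    (q : (String × (String × String × String)) × Nat) (n : Nat) (h : q ∈ l.zipIdx n) : n ≤ q.2 :=
  List.le_snd_of_mem_zipIdx h

theorem pvZipIdx_snd_lt (l : List (String × (String × String × String))) (n : Nat) :
    (l.zipIdx n).Pairwise (fun p q => p.2 < q.2) := by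
  induction l generalizing n with
  | nil => simp
  | cons a r ih =>
    rw [List.zipIdx_cons]
    refine List.pairwise_cons.mpr ⟨?_, ih (n + 1)⟩
    intro q hq
    exact lt_of_lt_of_le (Nat.lt_succ_self n) (pvZipIdx_le_snd r q (n + 1) hq)

-- a permutation of a list with pairwise-distinct positions has pairwise-distinct positions
theorem pvSndNe_of_perm (d e : List ((String × (String × String × String)) × Nat))
    (hp : d.Perm e) (he : e.Pairwise (fun p q => p.2 ≠ q.2)) :
    d.Pairwise (fun p q => p.2 ≠ q.2) := by
  rw [← List.pairwise_map (f := Prod.snd)] at he ⊢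
  exact ((hp.map Prod.snd).nodup_iff).mpr he

-- the bubble result names the stable sort of the decorated list
theorem pvBubbleD_eq_sorted (l : List (String × (String × String × String))) :
    pvPassD^[l.length] (l.zipIdx) = PySem.List.sorted (l.zipIdx) pvKeyD := by
  refine (PySem.List.sorted_eq_of_perm_of_pairwise_lt _ _ _ ?_ ?_).symm
  · exact pvPassD_iterate_perm l.length (l.zipIdx)
  · apply pvStrict_of_le_of_snd_ne
    · exact pvPassD_iterate_sorted l.length (l.zipIdx) (by simp)
    · refine pvSndNe_of_perm _ _ (pvPassD_iterate_perm l.length (l.zipIdx)) ?_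
      exact (pvZipIdx_snd_lt l 0).imp (fun {p q} h => Nat.ne_of_lt h)

-- stability of PySem's sort: sorting a position-decorated list by the lexicographic key
-- and dropping the positions is sorting the plain list
theorem pvInsertBy_map_fst (acc : List ((String × (String × String × String)) × Nat))
    (p : (String × (String × String × String)) × Nat)
    (h : ∀ q ∈ acc, q.2 < p.2) :
    (PySem.List.insertBy (fun a b => decide (pvKeyD a < pvKeyD b)) p acc).map Prod.fst
      = PySem.List.insertBy (fun a b => decide (pvKey a < pvKey b)) p.1 (acc.map Prod.fst) := by
  induction acc with
  | nil => simp [PySem.List.insertBy]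
  | cons y ys ih =>
    have hy : y.2 < p.2 := h y (by simp)
    have hD : (pvKeyD p < pvKeyD y) ↔ (pvKey p.1 < pvKey y.1) := by
      simp only [pvKeyD]
      rw [Prod.Lex.toLex_lt_toLex]
      constructor
      · rintro (hk | ⟨hk, hi⟩)
        · exact hk
        · exact absurd hi (by omega)
      · exact Or.inl
    by_cases hk : pvKey p.1 < pvKey y.1
    · have e1 : (decide (pvKeyD p < pvKeyD y)) = true := decide_eq_true (hD.mpr hk)
      have e2 : (decide (pvKey p.1 < pvKey y.1)) = true := decide_eq_true hk
      simp only [PySem.List.insertBy, List.map_cons, e1, e2, if_true]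
    · have e1 : (decide (pvKeyD p < pvKeyD y)) = false := decide_eq_false (fun hh => hk (hD.mp hh))
      have e2 : (decide (pvKey p.1 < pvKey y.1)) = false := decide_eq_false hk
      simp only [PySem.List.insertBy, List.map_cons, e1, e2, if_false, Bool.false_eq_true]
      rw [ih (fun q hq => h q (by simp [hq]))]

theorem pvFold_map_fst (d : List ((String × (String × String × String)) × Nat)) :
    ∀ acc : List ((String × (String × String × String)) × Nat),
    (∀ p ∈ acc, ∀ q ∈ d, p.2 < q.2) → d.Pairwise (fun p q => p.2 < q.2) →
    (d.foldl (fun a p => PySem.List.insertBy (fun a b => decide (pvKeyD a < pvKeyD b)) p a) acc).map Prod.fst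
      = (d.map Prod.fst).foldl (fun a x => PySem.List.insertBy (fun a b => decide (pvKey a < pvKey b)) x a) (acc.map Prod.fst) := by
  induction d with
  | nil => intro acc _ _; simp
  | cons p d' ih =>
    intro acc hacc hpw
    simp only [List.foldl_cons, List.map_cons]
    rw [← pvInsertBy_map_fst acc p (fun q hq => hacc q hq p (by simp))]
    apply ih
    · intro r hr q hq
      rcases (PySem.List.mem_insertBy _ _ _ _).mp hr with hrp | hr'
      · rw [hrp]; exact (List.pairwise_cons.mp hpw).1 q hq
      · exact hacc r hr' q (by simp [hq])
    · exact (List.pairwise_cons.mp hpw).2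

theorem pvSorted_map_fst (d : List ((String × (String × String × String)) × Nat))
    (h : d.Pairwise (fun p q => p.2 < q.2)) :
    (PySem.List.sorted d pvKeyD).map Prod.fst = PySem.List.sorted (d.map Prod.fst) pvKey := by
  rw [PySem.List.sorted_eq_foldl_insertBy, PySem.List.sorted_eq_foldl_insertBy]
  simpa using pvFold_map_fst d [] (by simp) h

-- key facts: an empty priority has the minimal key, a non-empty one a strictly larger one
theorem pvKey_of_empty (x : String × (String × String × String)) (h : x.2.2.2 = "") :
    pvKey x = "" := by
  simp [pvKey, h]
  rfl

theorem pvKey_pos (x : String × (String × String × String)) (h : x.2.2.2 ≠ "") :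
    "" < pvKey x := by
  have h1 : x.2.2.2.toList ≠ [] := fun hn => h (String.toList_inj.mp (by simp [hn]))
  have h2 : (pvKey x).toList = List.map PySem.Chars.upperChar x.2.2.2.toList := by
    simp [pvKey, PySem.Str.toList_upper, PySem.Chars.upper]
  rw [String.lt_iff_toList_lt]
  cases hc : x.2.2.2.toList with
  | nil => exact absurd hc h1
  | cons c cs =>
    rw [h2, hc]
    exact List.nil_lt_cons _ _

-- the empties sort first, in original order
theorem pvSorted_partition (l : List (String × (String × String × String))) :
    PySem.List.sorted (l.zipIdx) pvKeyD
      = (l.zipIdx).filter (fun p => p.1.2.2.2 == "")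
        ++ PySem.List.sorted ((l.zipIdx).filter (fun p => p.1.2.2.2 != "")) pvKeyD := by
  refine (PySem.List.sorted_eq_of_perm_of_pairwise_lt _ _ _ ?_ ?_)
  · refine ((PySem.List.sorted_perm _ _ false).append_left _).trans ?_
    exact List.filter_append_perm (fun p => p.1.2.2.2 == "") (l.zipIdx)
  · refine List.pairwise_append.mpr ⟨?_, ?_, ?_⟩
    · refine List.Pairwise.imp_of_mem ?_ ((pvZipIdx_snd_lt l 0).filter _)
      intro p q hp hq hlt
      have hpk : pvKey p.1 = "" := pvKey_of_empty p.1 (by simpa using (List.mem_filter.mp hp).2)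
      have hqk : pvKey q.1 = "" := pvKey_of_empty q.1 (by simpa using (List.mem_filter.mp hq).2)
      exact (Prod.Lex.toLex_lt_toLex).mpr (Or.inr ⟨by rw [hpk, hqk], hlt⟩)
    · apply pvStrict_of_le_of_snd_ne
      · exact PySem.List.sorted_pairwise _ _
      · refine pvSndNe_of_perm _ _ (PySem.List.sorted_perm _ _ false) ?_
        exact ((pvZipIdx_snd_lt l 0).filter _).imp (fun {p q} h => Nat.ne_of_lt h)
    · intro p hp q hq
      have hpk : pvKey p.1 = "" := pvKey_of_empty p.1 (by simpa using (List.mem_filter.mp hp).2)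
      have hqm : q ∈ (l.zipIdx).filter (fun p => p.1.2.2.2 != "") := (PySem.List.mem_sorted _ _ _ _).mp hq
      have hqk : "" < pvKey q.1 := pvKey_pos q.1 (by simpa using (List.mem_filter.mp hqm).2)
      exact (Prod.Lex.toLex_lt_toLex).mpr (Or.inl (by rw [hpk]; exact hqk))

theorem pvPopFront_eq_drop (n : Nat) (l : List (String × (String × String × String))) :
    pvPopFront n l = l.drop n := by
  induction n generalizing l with
  | zero => simp [pvPopFront]
  | succ n ih =>
    rw [pvPopFront, ih l.tail, ← List.drop_one, List.drop_drop]
    congr 1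
    omega

theorem pvRange_foldl_pass (n : Nat) (x : List (String × (String × String × String))) :
    (List.range n).foldl (fun acc _ => pvPass acc) x = pvPass^[n] x := by
  induction n with
  | zero => simp
  | succ n ih =>
    rw [List.range_succ, List.foldl_append, ih, Function.iterate_succ_apply']
    rfl

-- dropping the positions commutes with filtering
theorem pvMap_fst_filter (p : (String × (String × String × String)) → Bool)
    (l : List (String × (String × String × String))) :
    ((l.zipIdx).filter (fun q => p q.1)).map Prod.fst = l.filter p := by
  have h := List.filter_map (f := Prod.fst) (p := p) (l := l.zipIdx)
  rw [List.zipIdx_map_fst] at h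
  exact h.symm

theorem pvMap_fst_filter_emp (l : List (String × (String × String × String))) :
    ((l.zipIdx).filter (fun p => p.1.2.2.2 == "")).map Prod.fst
      = l.filter (fun x => x.2.2.2 == "") :=
  pvMap_fst_filter (fun x => x.2.2.2 == "") l

theorem pvMap_fst_filter_ne (l : List (String × (String × String × String))) :
    ((l.zipIdx).filter (fun p => p.1.2.2.2 != "")).map Prod.fst
      = l.filter (fun x => x.2.2.2 != "") :=
  pvMap_fst_filter (fun x => x.2.2.2 != "") l

-- the bubble phase of A computes: empties (in original order) first, then the stable sort
theorem pvBubble_eq (itens : List (String × (String × String × String))) :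
    (List.range itens.length).foldl (fun acc _ => pvPass acc) itens
      = itens.filter (fun x => x.2.2.2 == "")
        ++ PySem.List.sorted (itens.filter (fun x => x.2.2.2 != "")) pvKey := by
  have hstb : pvStb (itens.zipIdx) :=
    (pvZipIdx_snd_lt itens 0).imp (fun {p q} h => fun _ => h)
  have hmap : (itens.zipIdx).map Prod.fst = itens := List.zipIdx_map_fst 0 itens
  rw [pvRange_foldl_pass]
  have h2 : (pvPassD^[itens.length] (itens.zipIdx)).map Prod.fst
      = pvPass^[itens.length] itens := by
    rw [pvPassD_iterate_map_fst itens.length (itens.zipIdx) hstb, hmap]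
  rw [← h2, pvBubbleD_eq_sorted, pvSorted_partition, List.map_append]
  rw [pvSorted_map_fst _ ((pvZipIdx_snd_lt itens 0).filter _)]
  rw [pvMap_fst_filter_emp, pvMap_fst_filter_ne]

theorem pvVaz_eq (itens : List (String × (String × String × String))) :
    (itens.filter (fun x => x.2.2.2 == "")
        ++ PySem.List.sorted (itens.filter (fun x => x.2.2.2 != "")) pvKey).foldl
      (fun acc x => if x.2.2.2 == "" then acc ++ [x] else acc) []
      = itens.filter (fun x => x.2.2.2 == "") := by
  rw [PySem.List.foldl_append_if_eq_filter, List.nil_append, List.filter_append]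
  have h1 : (itens.filter (fun x => x.2.2.2 == "")).filter (fun x => x.2.2.2 == "")
      = itens.filter (fun x => x.2.2.2 == "") :=
    List.filter_eq_self.mpr (fun x hx => (List.mem_filter.mp hx).2)
  have h2 : (PySem.List.sorted (itens.filter (fun x => x.2.2.2 != "")) pvKey).filter
      (fun x => x.2.2.2 == "") = [] := by
    refine List.filter_eq_nil_iff.mpr ?_
    intro x hx
    have hx' : x ∈ itens.filter (fun x => x.2.2.2 != "") := (PySem.List.mem_sorted _ _ _ _).mp hx
    have := (List.mem_filter.mp hx').2
    simpa using this
  rw [h1, h2, List.append_nil]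

-- ===== VERDICT (by name: the statement is the Claim_ definition above) =====
theorem ordenarPorPrioridade_spec : Claim_equal_ordenarPorPrioridade := by
  intro itens _
  show ordenarPorPrioridade itens = ordenarPorPrioridade_alt itens
  simp only [ordenarPorPrioridade, ordenarPorPrioridade_alt]
  rw [pvBubble_eq, pvVaz_eq, pvPopFront_eq_drop]
  rw [List.drop_left]
  rfl
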